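-- pv_equiv track=rewrite | github.com/nirkraw/Ranqet | scripts/generateRedirectEndpoints.py | replacePathParams
-- ===== SOURCE A (Python) =====
-- def replacePathParams(path):
--     tokens = path.split("/")
--     replacedPath = ""
--     for tok in tokens:
--         if (tok.startswith(":")):
--             replacedPath = replacedPath + "{" + tok.strip(":") + "}/"
--         else:
--             replacedPath = replacedPath + tok + "/"
--     return replacedPath[:-1]
-- ===== SOURCE B (Python) =====
-- def replacePathParams(path):
--     # One left-to-right scan over the characters: slashes are copied through,
--     # each maximal non-slash run is rewritten in place (no split/rebuild pass).
--     out = []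
--     i, n = 0, len(path)
--     while i < n:
--         if path[i] == '/':
--             out.append('/')
--             i += 1
--         else:
--             j = i
--             while j < n and path[j] != '/':
--                 j += 1
--             seg = path[i:j]
--             if seg.startswith(':'):
--                 out.append('{' + seg.strip(':') + '}')
--             else:
--                 out.append(seg)
--             i = j
--     return ''.join(out)
-- ===== Notes on version B (the rewrite author's own statement) =====
-- stated objective: alternative
-- what changed: B replaces A's split-into-tokens-then-rebuild-with-trailing-separator accumulator loop (and the final drop-last-character trim) by a single left-to-right character scan that copies separator characters through and rewrites each maximal segment in place.
import Mathlib
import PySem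

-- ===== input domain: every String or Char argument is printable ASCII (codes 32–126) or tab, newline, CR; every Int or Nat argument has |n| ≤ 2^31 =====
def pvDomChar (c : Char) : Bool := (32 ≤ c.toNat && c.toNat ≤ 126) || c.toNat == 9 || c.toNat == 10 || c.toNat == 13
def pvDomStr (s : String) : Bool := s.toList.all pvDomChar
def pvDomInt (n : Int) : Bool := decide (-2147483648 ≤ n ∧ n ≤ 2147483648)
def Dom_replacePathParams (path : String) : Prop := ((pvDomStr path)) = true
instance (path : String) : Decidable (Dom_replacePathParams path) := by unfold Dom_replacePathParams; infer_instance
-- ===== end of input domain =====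

-- B replaces A's split-on-'/'-then-rebuild accumulator loop with a single character scan
-- that copies slashes through and rewrites each maximal non-slash run in place (objective: alternative).

-- ===== PORT A =====
-- A: tokens = path.split("/"); accumulate each (possibly rewritten) token plus "/"; drop the last char.
def replacePathParams (path : String) : String :=
  let tokens := PySem.Chars.splitOn path.toList ['/']
  let replacedPath := tokens.foldl (fun acc tok =>
    if PySem.Chars.startswith tok [':'] then
      acc ++ (['{'] ++ PySem.Chars.stripChars tok [':'] ++ ['}', '/'])
    else
      acc ++ (tok ++ ['/'])) []
  String.ofList (PySem.List.slice replacedPath none (some (-1)))   -- replacedPath[:-1]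

-- ===== PORT B =====
-- B's segment rewrite: '{' + seg.strip(':') + '}' when seg startswith ':', else seg unchanged.
def pvSegB (seg : List Char) : List Char :=
  if PySem.Chars.startswith seg [':'] then
    ['{'] ++ PySem.Chars.stripChars seg [':'] ++ ['}']
  else seg

-- B's outer while loop: copy '/' through; otherwise the inner `while j < n and path[j] != '/'`
-- scan is the takeWhile/dropWhile pair (seg = path[i:j], resume at i = j); the appended
-- pieces of `out` are concatenated as ''.join does.
def pvScanB : List Char → List Char
  | [] => []
  | c :: rest =>
    if c = '/' then '/' :: pvScanB rest
    else
      pvSegB (c :: rest.takeWhile (· ≠ '/')) ++ pvScanB (rest.dropWhile (· ≠ '/'))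
termination_by cs => cs.length
decreasing_by
  · simp
  · have h := List.length_dropWhile_le (fun x => !decide (x = '/')) rest
    simp at h ⊢
    omega

def replacePathParams_alt (path : String) : String :=
  String.ofList (pvScanB path.toList)

-- ===== PRECONDITION & SPEC =====
def Spec_replacePathParams (path : String) (out : String) : Prop := out = replacePathParams_alt path
instance (path : String) (out : String) : Decidable (Spec_replacePathParams path out) := by unfold Spec_replacePathParams; infer_instance

-- ===== CLAIM (what is proved, stated in full; the proofs are below) =====
def Claim_equal_replacePathParams : Prop := ∀ (path : String), Dom_replacePathParams path → Spec_replacePathParams path (replacePathParams path)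

-- ===== LEMMAS AND PROOFS =====

-- Specification recursion for Python's split on the single character '/'.
def pvSplit1 : List Char → List (List Char)
  | [] => [[]]
  | c :: rest =>
    if c = '/' then [] :: pvSplit1 rest else (pvSplit1 rest).modifyHead (c :: ·)

lemma pvSplit1_ne_nil (cs : List Char) : pvSplit1 cs ≠ [] := by
  cases cs with
  | nil => simp [pvSplit1]
  | cons c rest =>
    simp only [pvSplit1]
    split
    · simp
    · cases h : pvSplit1 rest with
      | nil => exact absurd h (pvSplit1_ne_nil rest)
      | cons a t => simp

lemma pvGo_spec (fuel : Nat) (l cur : List Char) (acc : List (List Char)) (h : l.length < fuel) :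
    PySem.Chars.splitOn.go ['/'] fuel l cur acc
      = acc.reverse ++ (pvSplit1 l).modifyHead (cur.reverse ++ ·) := by
  induction fuel generalizing l cur acc with
  | zero => omega
  | succ f ih =>
    cases l with
    | nil => simp [PySem.Chars.splitOn.go, pvSplit1]
    | cons c rest =>
      by_cases hc : c = '/'
      · subst hc
        rw [show PySem.Chars.splitOn.go ['/'] (f+1) ('/' :: rest) cur acc
              = PySem.Chars.splitOn.go ['/'] f (List.drop 1 ('/' :: rest)) [] (cur.reverse :: acc) by
            simp [PySem.Chars.splitOn.go, List.isPrefixOf]]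
        rw [ih _ _ _ (by simpa using h)]
        cases hs : pvSplit1 rest with
        | nil => exact absurd hs (pvSplit1_ne_nil rest)
        | cons a t => simp [pvSplit1, hs]
      · rw [show PySem.Chars.splitOn.go ['/'] (f+1) (c :: rest) cur acc
              = PySem.Chars.splitOn.go ['/'] f rest (c :: cur) acc by
            simp [PySem.Chars.splitOn.go, List.isPrefixOf]
            intro h; exact absurd h.symm hc]
        rw [ih _ _ _ (by simpa using Nat.lt_of_succ_lt_succ h)]
        cases hs : pvSplit1 rest with
        | nil => exact absurd hs (pvSplit1_ne_nil rest)
        | cons a t => simp [pvSplit1, hc, hs]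

lemma pvSplitOn_eq (cs : List Char) : PySem.Chars.splitOn cs ['/'] = pvSplit1 cs := by
  rw [PySem.Chars.splitOn, pvGo_spec _ _ _ _ (by omega)]
  cases hs : pvSplit1 cs with
  | nil => exact absurd hs (pvSplit1_ne_nil cs)
  | cons a t => simp

-- Python's `s[:-1]` on a list is dropLast.
lemma pvSlice_neg_one (xs : List Char) :
    PySem.List.slice xs none (some (-1)) = xs.dropLast := by
  cases xs with
  | nil => rfl
  | cons x rest =>
    have h1 : PySem.List.slice (x :: rest) none (some (-1))
        = List.take ((x :: rest).length - 1) (x :: rest) := by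
      simp [PySem.List.slice]
    rw [h1, List.dropLast_eq_take]

-- every flatMap piece ends with '/', so the flattening of a nonempty token list is nonempty
lemma pvFlat_ne_nil (ts : List (List Char)) (h : ts ≠ []) :
    ts.flatMap (fun tok => pvSegB tok ++ ['/']) ≠ [] := by
  cases ts with
  | nil => exact absurd rfl h
  | cons a t => simp

-- the head of a dropWhile residue fails the predicate
lemma pvDropWhile_head (p : Char → Bool) :
    ∀ (rest t : List Char) (d : Char), rest.dropWhile p = d :: t → p d = false := by
  intro rest
  induction rest with
  | nil => intro t d h; simp [List.dropWhile] at h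
  | cons a l ih =>
    intro t d h
    by_cases ha : p a
    · rw [List.dropWhile_cons_of_pos ha] at h; exact ih t d h
    · rw [List.dropWhile_cons_of_neg ha] at h
      cases h; simpa using ha

-- split1 exposes the first maximal non-slash run
lemma pvSplit1_seg (cs : List Char) :
    pvSplit1 cs = (cs.takeWhile (· ≠ '/')) ::
      (match cs.dropWhile (· ≠ '/') with
        | [] => ([] : List (List Char))
        | _ :: t => pvSplit1 t) := by
  induction cs with
  | nil => simp [pvSplit1]
  | cons c rest ih =>
    by_cases hc : c = '/'
    · subst hc; simp [pvSplit1, List.takeWhile, List.dropWhile]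
    · rw [List.takeWhile_cons_of_pos (by simpa using hc),
          List.dropWhile_cons_of_pos (by simpa using hc)]
      simp only [pvSplit1, if_neg hc, ih, List.modifyHead]

-- Main invariant: the scan equals "split, rewrite each token, join with '/'" (minus the final '/').
lemma pvScan_eq (cs : List Char) :
    pvScanB cs = ((pvSplit1 cs).flatMap (fun tok => pvSegB tok ++ ['/'])).dropLast := by
  cases cs with
  | nil => simp [pvScanB, pvSplit1, pvSegB, PySem.Chars.startswith]
  | cons c rest =>
    by_cases hc : c = '/'
    · subst hc
      have hne := pvFlat_ne_nil (pvSplit1 rest) (pvSplit1_ne_nil rest)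
      rw [show pvScanB ('/' :: rest) = '/' :: pvScanB rest by rw [pvScanB.eq_def]; simp]
      rw [pvScan_eq rest]
      have hseg : pvSegB [] = [] := by simp [pvSegB, PySem.Chars.startswith]
      simp [pvSplit1, hseg, List.dropLast_cons_of_ne_nil hne]
    · rw [show pvScanB (c :: rest)
            = pvSegB (c :: rest.takeWhile (· ≠ '/')) ++ pvScanB (rest.dropWhile (· ≠ '/')) by
          rw [pvScanB.eq_def]; simp [hc]]
      rw [pvSplit1_seg (c :: rest),
          List.takeWhile_cons_of_pos (by simpa using hc),
          List.dropWhile_cons_of_pos (by simpa using hc)]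
      cases hd : rest.dropWhile (· ≠ '/') with
      | nil =>
        simp [pvScanB]
      | cons d t =>
        have hdslash : d = '/' := by
          have := pvDropWhile_head (fun c => decide (c ≠ '/')) rest t d hd
          simpa using this
        subst hdslash
        have hne := pvFlat_ne_nil (pvSplit1 t) (pvSplit1_ne_nil t)
        rw [show pvScanB ('/' :: t) = '/' :: pvScanB t by rw [pvScanB.eq_def]; simp]
        rw [pvScan_eq t]
        simp [List.append_assoc, List.dropLast_cons_of_ne_nil hne]
termination_by cs.length
decreasing_by
  · simp
  · have h1 := List.length_dropWhile_le (fun x => decide (x ≠ '/')) rest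
    rw [hd] at h1
    simp at h1 ⊢
    omega

-- per-token: A's branch body is pvSegB followed by '/'
lemma pvTok_eq (tok : List Char) :
    (if PySem.Chars.startswith tok [':'] then
      (['{'] ++ PySem.Chars.stripChars tok [':'] ++ ['}', '/'])
    else (tok ++ ['/'])) = pvSegB tok ++ ['/'] := by
  unfold pvSegB; split <;> simp

-- ===== VERDICT (by name: the statement is the Claim_ definition above) =====
theorem replacePathParams_spec : Claim_equal_replacePathParams := by
  intro path _
  show replacePathParams path = replacePathParams_alt path
  unfold replacePathParams replacePathParams_alt
  simp only [pvSplitOn_eq]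
  have hb : (fun (acc tok : List Char) =>
      if PySem.Chars.startswith tok [':'] then
        acc ++ (['{'] ++ PySem.Chars.stripChars tok [':'] ++ ['}', '/'])
      else acc ++ (tok ++ ['/']))
      = fun acc tok => acc ++ (pvSegB tok ++ ['/']) := by
    funext acc tok
    rw [← pvTok_eq tok]
    split <;> rfl
  rw [hb, PySem.List.foldl_append_eq_flatMap (fun tok => pvSegB tok ++ ['/']) _ []]
  rw [pvSlice_neg_one, pvScan_eq]
  simp
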